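-- pv_equiv track=rewrite | github.com/mindsandcompany/doc_parser | doc_preprocessors/legacy/preprocess_ocr.py | _extract_used_headers
-- ===== SOURCE A (Python) =====
-- from typing import Optional, Iterable, Any, List, Dict, Tuple
-- from typing import Iterable, Iterator, Optional, Union
--
-- def _extract_used_headers(header_info_list: list[dict]) -> Optional[list[str]]:
--     """헤더 정보 리스트에서 실제 사용되는 헤더들을 순서대로 추출 (중복 제거, title 제외)"""
--     if not header_info_list:
--         return None
--
--     # 순서를 유지하면서 중복 제거
--     seen_headers = set()
--     ordered_headers = []
--
--     # level 1, 2, 3 순서로 헤더 추가 (title은 별도 처리되므로 제외)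
--     for level in [1, 2, 3]:
--         for header_info in header_info_list:
--             if level in header_info and header_info[level]:
--                 header_text = header_info[level]
--                 if header_text not in seen_headers:
--                     seen_headers.add(header_text)
--                     ordered_headers.append(header_text)
--
--     return ordered_headers if ordered_headers else None
-- ===== SOURCE B (Python) =====
-- from typing import Optional
--
--
-- def _extract_used_headers(header_info_list: list[dict]) -> Optional[list[str]]:
--     """One pass bucketing by level, then a single order-preserving dedup pass."""
--     if not header_info_list:
--         return None
--
--     bucket1, bucket2, bucket3 = [], [], []
--     for header_info in header_info_list:
--         if 1 in header_info and header_info[1]: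
--             bucket1.append(header_info[1])
--         if 2 in header_info and header_info[2]:
--             bucket2.append(header_info[2])
--         if 3 in header_info and header_info[3]:
--             bucket3.append(header_info[3])
--
--     seen = set()
--     result = []
--     for text in bucket1 + bucket2 + bucket3:
--         if text not in seen:
--             seen.add(text)
--             result.append(text)
--
--     return result if result else None
-- ===== Notes on version B (the rewrite author's own statement) =====
-- stated objective: alternative
-- what changed: B replaces A's three full scans of the list (one per level) by a single pass that buckets truthy level-1/2/3 values into three lists, followed by one order-preserving dedup pass over the concatenated buckets.
import Mathlib
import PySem

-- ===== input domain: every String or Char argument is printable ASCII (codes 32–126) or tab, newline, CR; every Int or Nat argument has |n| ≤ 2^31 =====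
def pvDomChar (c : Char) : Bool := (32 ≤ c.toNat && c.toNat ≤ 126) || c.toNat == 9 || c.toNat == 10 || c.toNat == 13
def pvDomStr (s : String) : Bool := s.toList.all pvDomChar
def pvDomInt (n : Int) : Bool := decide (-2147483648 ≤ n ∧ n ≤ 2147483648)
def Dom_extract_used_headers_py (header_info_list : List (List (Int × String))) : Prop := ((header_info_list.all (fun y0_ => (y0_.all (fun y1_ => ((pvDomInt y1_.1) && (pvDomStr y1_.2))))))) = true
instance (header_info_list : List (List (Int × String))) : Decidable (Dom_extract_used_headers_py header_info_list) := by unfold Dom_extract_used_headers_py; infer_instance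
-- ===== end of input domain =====

-- B buckets truthy level-1/2/3 values in one pass over the list, then dedups the
-- concatenation once, instead of A's three interleaved scan+dedup passes (objective: alternative decomposition, same cost).


-- ===== PORT A =====
def extract_used_headers_py (header_info_list : List (List (Int × String))) : Option (List String) :=
  if header_info_list = [] then none
  else
    -- for level in [1, 2, 3]: for header_info in header_info_list: …
    let r := ([1, 2, 3] : List Int).foldl
      (fun (st : PySem.Set String × List String) (level : Int) =>
        header_info_list.foldl
          (fun (st : PySem.Set String × List String) (header_info : List (Int × String)) =>
            match (PySem.Dict.mk header_info).get? level with
            | some header_text =>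
                if header_text ≠ "" then
                  if PySem.Set.contains st.1 header_text then st
                  else (PySem.Set.add st.1 header_text, st.2 ++ [header_text])
                else st
            | none => st)
          st)
      (PySem.Set.empty, [])
    if r.2 = [] then none else some r.2

-- ===== PORT B =====
def extract_used_headers_py_alt (header_info_list : List (List (Int × String))) : Option (List String) :=
  if header_info_list = [] then none
  else
    -- single pass: bucket truthy values for levels 1, 2, 3
    let b := header_info_list.foldl
      (fun (b : List String × List String × List String) (header_info : List (Int × String)) =>
        let b1 := match (PySem.Dict.mk header_info).get? 1 with
          | some t => if t ≠ "" then b.1 ++ [t] else b.1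
          | none => b.1
        let b2 := match (PySem.Dict.mk header_info).get? 2 with
          | some t => if t ≠ "" then b.2.1 ++ [t] else b.2.1
          | none => b.2.1
        let b3 := match (PySem.Dict.mk header_info).get? 3 with
          | some t => if t ≠ "" then b.2.2 ++ [t] else b.2.2
          | none => b.2.2
        (b1, b2, b3))
      ([], [], [])
    -- one order-preserving dedup pass over the concatenation
    let r := (b.1 ++ b.2.1 ++ b.2.2).foldl
      (fun (st : PySem.Set String × List String) (text : String) =>
        if PySem.Set.contains st.1 text then st
        else (PySem.Set.add st.1 text, st.2 ++ [text]))
      (PySem.Set.empty, [])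
    if r.2 = [] then none else some r.2

-- ===== PRECONDITION & SPEC =====
def Spec_extract_used_headers_py (header_info_list : List (List (Int × String))) (out : Option (List String)) : Prop := out = extract_used_headers_py_alt header_info_list
instance (header_info_list : List (List (Int × String))) (out : Option (List String)) : Decidable (Spec_extract_used_headers_py header_info_list out) := by unfold Spec_extract_used_headers_py; infer_instance

-- ===== CLAIM (what is proved, stated in full; the proofs are below) =====
def Claim_equal_extract_used_headers_py : Prop := ∀ (header_info_list : List (List (Int × String))), Dom_extract_used_headers_py header_info_list → Spec_extract_used_headers_py header_info_list (extract_used_headers_py header_info_list)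

-- ===== LEMMAS AND PROOFS =====

/-- The truthy value a dict contributes at a level (shared characterisation of both loops). -/
def pvExt (header_info : List (Int × String)) (level : Int) : Option String :=
  match (PySem.Dict.mk header_info).get? level with
  | some t => if t ≠ "" then some t else none
  | none => none

/-- The dedup step both ports perform. -/
def pvDStep (st : PySem.Set String × List String) (t : String) : PySem.Set String × List String :=
  if PySem.Set.contains st.1 t then st else (PySem.Set.add st.1 t, st.2 ++ [t])

/-- The truthy values extracted at one level, in list order. -/
def pvVals (hs : List (List (Int × String))) (level : Int) : List String :=
  hs.filterMap (fun d => pvExt d level)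

/-- A's inner loop at one level is the dedup fold over that level's truthy values. -/
theorem pvA_inner (hs : List (List (Int × String))) (level : Int)
    (st : PySem.Set String × List String) :
    hs.foldl
      (fun (st : PySem.Set String × List String) (header_info : List (Int × String)) =>
        match (PySem.Dict.mk header_info).get? level with
        | some header_text =>
            if header_text ≠ "" then
              if PySem.Set.contains st.1 header_text then st
              else (PySem.Set.add st.1 header_text, st.2 ++ [header_text])
            else st
        | none => st)
      st
    = (pvVals hs level).foldl pvDStep st := by
  induction hs generalizing st with
  | nil => rfl
  | cons d rest ih =>
      rw [List.foldl_cons]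
      cases h : (PySem.Dict.mk d).get? level with
      | none =>
          rw [show pvVals (d :: rest) level = pvVals rest level by simp [pvVals, pvExt, h],
            ← ih st]
      | some t =>
          by_cases ht : t = ""
          · rw [show pvVals (d :: rest) level = pvVals rest level by
              simp [pvVals, pvExt, h, ht], ← ih st]
            simp [ht]
          · rw [show pvVals (d :: rest) level = t :: pvVals rest level by
              simp [pvVals, pvExt, h, ht], List.foldl_cons, ← ih]
            simp [ht, pvDStep]

/-- B's bucket fold appends the per-level truthy values to the running buckets. -/
theorem pvB_buckets (hs : List (List (Int × String)))
    (b : List String × List String × List String) :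
    hs.foldl
      (fun (b : List String × List String × List String) (header_info : List (Int × String)) =>
        let b1 := match (PySem.Dict.mk header_info).get? 1 with
          | some t => if t ≠ "" then b.1 ++ [t] else b.1
          | none => b.1
        let b2 := match (PySem.Dict.mk header_info).get? 2 with
          | some t => if t ≠ "" then b.2.1 ++ [t] else b.2.1
          | none => b.2.1
        let b3 := match (PySem.Dict.mk header_info).get? 3 with
          | some t => if t ≠ "" then b.2.2 ++ [t] else b.2.2
          | none => b.2.2
        (b1, b2, b3))
      b
    = (b.1 ++ pvVals hs 1, b.2.1 ++ pvVals hs 2, b.2.2 ++ pvVals hs 3) := by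
  induction hs generalizing b with
  | nil => simp [pvVals]
  | cons d rest ih =>
      rw [List.foldl_cons, ih]
      have e : ∀ (l : Int) (acc : List String),
          (match (PySem.Dict.mk d).get? l with
            | some t => if t ≠ "" then acc ++ [t] else acc
            | none => acc) ++ pvVals rest l = acc ++ pvVals (d :: rest) l := by
        intro l acc
        cases h : (PySem.Dict.mk d).get? l with
        | none => simp [pvVals, pvExt, h]
        | some t => by_cases ht : t = "" <;> simp [pvVals, pvExt, h, ht]
      refine Prod.ext ?_ (Prod.ext ?_ ?_)
      · simpa using e 1 b.1
      · simpa using e 2 b.2.1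
      · simpa using e 3 b.2.2

-- ===== VERDICT (by name: the statement is the Claim_ definition above) =====
theorem extract_used_headers_py_spec : Claim_equal_extract_used_headers_py := by
  intro hs _
  unfold Spec_extract_used_headers_py extract_used_headers_py extract_used_headers_py_alt
  by_cases h : hs = []
  · simp [h]
  · simp only [h, reduceIte]
    rw [pvB_buckets]
    simp only [List.foldl_cons, List.foldl_nil, pvA_inner, List.nil_append,
      List.foldl_append]
    rfl
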